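-- pv_equiv track=rewrite | github.com/choinara0/Algorithm | Programmer/Level 2/회사 숫자 게임/회사 숫자 게임.py | solution
-- ===== SOURCE A (Python) =====
-- def solution(A, B):
--     answer = 0
--     a = sorted(A)
--     b = sorted(B)
--     tmp = 0
--     for i in range(len(a)):
--         for j in range(tmp, len(b)):
--             if a[i] < b[j]:
--                 answer += 1
--                 b.remove(b[j])
--                 tmp = j
--                 break
--
--     return answer
-- ===== SOURCE B (Python) =====
-- def solution(A, B):
--     a = sorted(A)
--     b = sorted(B)
--     answer = 0
--     j = 0
--     for x in a:
--         while j < len(b) and b[j] <= x: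
--             j += 1
--         if j < len(b):
--             answer += 1
--             j += 1
--     return answer
-- ===== Notes on version B (the rewrite author's own statement) =====
-- stated objective: faster
-- what changed: Replaced A's per-element rescan of b with b.remove() list mutation by a single two-pointer pass over the two sorted lists, so no inner scan or O(n) removal remains.
import Mathlib
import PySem

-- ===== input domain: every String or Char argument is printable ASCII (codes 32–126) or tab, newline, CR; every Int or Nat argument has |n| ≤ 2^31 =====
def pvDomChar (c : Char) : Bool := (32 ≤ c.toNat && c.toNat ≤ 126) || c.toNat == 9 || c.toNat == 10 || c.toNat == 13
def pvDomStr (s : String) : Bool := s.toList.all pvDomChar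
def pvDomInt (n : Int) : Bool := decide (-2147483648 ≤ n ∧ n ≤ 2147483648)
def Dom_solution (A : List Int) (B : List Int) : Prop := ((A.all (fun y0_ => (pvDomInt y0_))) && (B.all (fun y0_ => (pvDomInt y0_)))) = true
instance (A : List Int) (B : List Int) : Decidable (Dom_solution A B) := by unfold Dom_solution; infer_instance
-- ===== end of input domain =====

-- B replaces A's rescan-and-remove loop by a single two-pointer pass over the two sorted lists (no list mutation).

-- ===== PORT A =====
-- inner loop: 'for j in range(tmp, len(b)): if x < b[j]: answer += 1; b.remove(b[j]); tmp = j; break'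
-- (every index read is in range, so pyGetD _ _ 0 is exact for b[j])
def pvInnerA (x : Int) (st : Int × List Int × Nat) (j : Nat) : Int × List Int × Nat :=
  if h : j < st.2.1.length then
    if x < PySem.List.pyGetD st.2.1 (j : Int) 0 then
      (st.1 + 1, (PySem.List.remove? st.2.1 (PySem.List.pyGetD st.2.1 (j : Int) 0)).getD st.2.1, j)
    else pvInnerA x st (j + 1)
  else st
termination_by st.2.1.length - j

def solution (A : List Int) (B : List Int) : Int :=
  let a := PySem.List.sorted A (fun x => x) false
  let b := PySem.List.sorted B (fun x => x) false
  let s := (PySem.List.pyRange 0 (a.length : Int) 1).foldl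
    (fun st i => pvInnerA (PySem.List.pyGetD a i 0) st st.2.2) ((0 : Int), b, (0 : Nat))
  s.1

-- ===== PORT B =====
-- 'while j < len(b) and b[j] <= x: j += 1'
def pvAdvance (x : Int) (b : List Int) (j : Nat) : Nat :=
  if h : j < b.length then
    if PySem.List.pyGetD b (j : Int) 0 ≤ x then pvAdvance x b (j + 1) else j
  else j
termination_by b.length - j

-- 'if j < len(b): answer += 1; j += 1'
def pvStepB (b : List Int) (st : Int × Nat) (x : Int) : Int × Nat :=
  let j := pvAdvance x b st.2
  if j < b.length then (st.1 + 1, j + 1) else (st.1, j)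

def solution_alt (A : List Int) (B : List Int) : Int :=
  let a := PySem.List.sorted A (fun x => x) false
  let b := PySem.List.sorted B (fun x => x) false
  let s := a.foldl (pvStepB b) ((0 : Int), (0 : Nat))
  s.1

-- ===== PRECONDITION & SPEC =====
def Spec_solution (A : List Int) (B : List Int) (out : Int) : Prop := out = solution_alt A B
instance (A : List Int) (B : List Int) (out : Int) : Decidable (Spec_solution A B out) := by unfold Spec_solution; infer_instance

-- ===== CLAIM (what is proved, stated in full; the proofs are below) =====
def Claim_equal_solution : Prop := ∀ (A : List Int) (B : List Int), Dom_solution A B → Spec_solution A B (solution A B)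

-- ===== LEMMAS AND PROOFS =====

-- A's inner scan finds nothing when every element at an index ≥ j is ≤ x.
theorem pvInnerA_none (x ans : Int) (b : List Int) (tmp j : Nat)
    (h : ∀ k, j ≤ k → (hk : k < b.length) → b[k] ≤ x) :
    pvInnerA x (ans, b, tmp) j = (ans, b, tmp) := by
  fun_induction pvInnerA x (ans, b, tmp) j with
  | case1 j h' hlt =>
    exfalso
    have := h j le_rfl h'
    rw [PySem.List.pyGetD_natCast, List.getD_eq_getElem b 0 h'] at hlt
    omega
  | case2 j h' hlt ih =>
    exact ih (fun k hk hk2 => h k (by omega) hk2)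
  | case3 j h' => rfl

-- A's inner scan starting at j0 stops at the first index j with x < b[j].
theorem pvInnerA_found (x ans : Int) (b : List Int) (tmp j : Nat)
    (hj : j < b.length) (hlt : x < b[j]) :
    ∀ j0, j0 ≤ j → (∀ k, j0 ≤ k → k < j → (hk : k < b.length) → b[k] ≤ x) →
    pvInnerA x (ans, b, tmp) j0 = (ans + 1, (PySem.List.remove? b b[j]).getD b, j) := by
  have key : ∀ n j0, j - j0 = n → j0 ≤ j →
      (∀ k, j0 ≤ k → k < j → (hk : k < b.length) → b[k] ≤ x) →
      pvInnerA x (ans, b, tmp) j0 = (ans + 1, (PySem.List.remove? b b[j]).getD b, j) := by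
    intro n
    induction n with
    | zero =>
      intro j0 h0 hle hb
      have hej : j0 = j := by omega
      subst hej
      rw [pvInnerA]
      simp only [PySem.List.pyGetD_natCast, List.getD_eq_getElem b 0 hj]
      rw [dif_pos hj, if_pos hlt]
    | succ n ih =>
      intro j0 h0 hle hb
      have hj0len : j0 < b.length := by omega
      have hle' : b[j0] ≤ x := hb j0 le_rfl (by omega) hj0len
      rw [pvInnerA]
      simp only [PySem.List.pyGetD_natCast, List.getD_eq_getElem b 0 hj0len]
      rw [dif_pos hj0len, if_neg (by omega)]
      exact ih (j0 + 1) (by omega) (by omega) (fun k hk1 hk2 hk3 => hb k (by omega) hk2 hk3)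
  exact fun j0 hle hb => key (j - j0) j0 rfl hle hb

-- pulling a minimal element to the front of a sorted list is the identity
theorem cons_eraseIdx_sorted (t : List Int) : ∀ (j : Nat) (hj : j < t.length),
    t.Pairwise (· ≤ ·) → (∀ y ∈ t, t[j] ≤ y) → t[j] :: t.eraseIdx j = t := by
  induction t with
  | nil => intro j hj; simp at hj
  | cons c t' ih =>
    intro j hj hs hmin
    match j with
    | 0 => simp
    | Nat.succ j' =>
      have hj' : j' < t'.length := by simpa using hj
      have hcv : c = t'[j'] := by
        have h1 : c ≤ t'[j'] := (List.pairwise_cons.mp hs).1 _ (List.getElem_mem hj')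
        have h2 : t'[j'] ≤ c := by simpa using hmin c (by simp)
        omega
      have htail : t'[j'] :: t'.eraseIdx j' = t' := by
        refine ih j' hj' (List.pairwise_cons.mp hs).2 ?_
        intro y hy
        simpa using hmin y (by simp [hy])
      simp only [List.getElem_cons_succ, List.eraseIdx_cons_succ]
      rw [← hcv]
      nth_rewrite 2 [← htail]
      rw [← hcv]

-- removing the first occurrence of b[j] from a sorted list removes index j
theorem remove_sorted (b : List Int) : ∀ (j : Nat) (hj : j < b.length), b.Pairwise (· ≤ ·) →
    PySem.List.remove? b b[j] = some (b.eraseIdx j) := by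
  induction b with
  | nil => intro j hj; simp at hj
  | cons h t ih =>
    intro j hj hs
    match j with
    | 0 => simp
    | Nat.succ j' =>
      have hj' : j' < t.length := by simpa using hj
      simp only [List.getElem_cons_succ, List.eraseIdx_cons_succ]
      by_cases hev : h = t[j']
      · rw [← hev, PySem.List.remove?_cons_self]
        congr 1
        have hmin : ∀ y ∈ t, t[j'] ≤ y := by
          intro y hy
          rw [← hev]; exact (List.pairwise_cons.mp hs).1 y hy
        rw [hev]
        exact (cons_eraseIdx_sorted t j' hj' (List.pairwise_cons.mp hs).2 hmin).symm
      · rw [PySem.List.remove?_cons_of_ne t hev, ih j' hj' (List.pairwise_cons.mp hs).2]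
        rfl

theorem pvAdvance_eq (x : Int) (b : List Int) (j : Nat) :
    pvAdvance x b j = j + ((b.drop j).takeWhile (fun y => decide (y ≤ x))).length := by
  fun_induction pvAdvance x b j with
  | case1 j h' hle ih =>
    rw [PySem.List.pyGetD_natCast, List.getD_eq_getElem b 0 h'] at hle
    rw [ih, ← List.getElem_cons_drop h', List.takeWhile_cons_of_pos (by simpa using hle)]
    simp; omega
  | case2 j h' hle =>
    rw [PySem.List.pyGetD_natCast, List.getD_eq_getElem b 0 h'] at hle
    rw [← List.getElem_cons_drop h', List.takeWhile_cons_of_neg (by simpa using hle)]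
    simp
  | case3 j h' =>
    rw [List.drop_eq_nil_of_le (by omega)]
    simp

theorem eraseIdx_append_cons (l₁ l₂ : List Int) (a : Int) :
    (l₁ ++ a :: l₂).eraseIdx l₁.length = l₁ ++ l₂ := by
  induction l₁ with
  | nil => simp
  | cons c t ih => simpa using ih

-- main correspondence: A's state is (ans, u ++ b.drop j, tmp) where u is the already-skipped
-- prefix (every element of u is ≤ every remaining element of a); B's state is (ans, j).
theorem loop_eq (a : List Int) : ∀ (b u : List Int) (tmp j : Nat) (ans : Int),
    a.Pairwise (· ≤ ·) →
    (u ++ b.drop j).Pairwise (· ≤ ·) →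
    tmp ≤ u.length → j ≤ b.length →
    (∀ y ∈ u, ∀ z ∈ a, y ≤ z) →
    (a.foldl (fun st i => pvInnerA i st st.2.2) (ans, u ++ b.drop j, tmp)).1
      = (a.foldl (pvStepB b) (ans, j)).1 := by
  induction a with
  | nil => intros; rfl
  | cons x a' ih =>
    intro b u tmp j ans hsa hsb htmp hj hu
    simp only [List.foldl_cons]
    have hxa : ∀ z ∈ a', x ≤ z := fun z hz => (List.pairwise_cons.mp hsa).1 z hz
    have hux : ∀ y ∈ u, y ≤ x := fun y hy => hu y hy x (by simp)
    obtain ⟨q, hq⟩ : ∃ q, (b.drop j).takeWhile (fun y => decide (y ≤ x)) = q := ⟨_, rfl⟩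
    obtain ⟨r, hr⟩ : ∃ r, (b.drop j).dropWhile (fun y => decide (y ≤ x)) = r := ⟨_, rfl⟩
    have hsplit : b.drop j = q ++ r := by rw [← hq, ← hr, List.takeWhile_append_dropWhile]
    have hqle : ∀ y ∈ q, y ≤ x := by
      intro y hy; rw [← hq] at hy; simpa using List.mem_takeWhile_imp hy
    have hadv : pvAdvance x b j = j + q.length := by rw [pvAdvance_eq, hq]
    have hdropm : b.drop (j + q.length) = r := by
      rw [← List.drop_drop, hsplit, List.drop_left]
    cases r with
    | nil =>
      -- the whole remaining tail of b is ≤ x : A finds nothing, B runs off the end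
      have hqall : b.drop j = q := by rw [hsplit, List.append_nil]
      have hqlen : q.length = b.length - j := by rw [← hqall, List.length_drop]
      have hstepB : pvStepB b (ans, j) x = (ans, b.length) := by
        simp only [pvStepB, hadv, hqlen]
        rw [if_neg (by omega)]
        congr 1; omega
      have hall : ∀ y ∈ u ++ b.drop j, y ≤ x := by
        intro y hy
        rcases List.mem_append.mp hy with h1 | h2
        · exact hux _ h1
        · rw [hqall] at h2; exact hqle _ h2
      have hstepA : pvInnerA x (ans, u ++ b.drop j, tmp) tmp = (ans, u ++ b.drop j, tmp) := by
        apply pvInnerA_none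
        intro k _ hk
        exact hall _ (List.getElem_mem hk)
      rw [hstepA, hstepB]
      have hstate : u ++ b.drop j = (u ++ b.drop j) ++ b.drop b.length := by
        simp [List.drop_length]
      rw [hstate] at hsb ⊢
      refine ih b (u ++ b.drop j) tmp b.length ans (List.pairwise_cons.mp hsa).2 hsb ?_ le_rfl ?_
      · simp only [List.length_append]; omega
      · intro y hy z hz
        exact le_trans (hall y hy) (hxa z hz)
    | cons d rest =>
      -- d is the first remaining element of b exceeding x
      have hxd : x < d := by
        have hne : (b.drop j).dropWhile (fun y => decide (y ≤ x)) ≠ [] := by rw [hr]; simp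
        have hf := List.head_dropWhile_not (fun y => decide (y ≤ x)) (l := b.drop j) hne
        simp [hr] at hf
        omega
      have hb2 : u ++ b.drop j = (u ++ q) ++ d :: rest := by
        rw [hsplit, List.append_assoc]
      have hmlt : j + q.length < b.length := by
        by_contra hcon
        rw [List.drop_eq_nil_of_le (by omega)] at hdropm
        exact (List.cons_ne_nil d rest) hdropm.symm
      have hstepB : pvStepB b (ans, j) x = (ans + 1, j + q.length + 1) := by
        simp only [pvStepB, hadv]
        rw [if_pos hmlt]
      have hlenA : (u ++ q).length < ((u ++ q) ++ d :: rest).length := by simp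
      have hgetA : ((u ++ q) ++ d :: rest)[(u ++ q).length]'hlenA = d :=
        List.getElem_of_append rfl rfl
      have hsb2 : ((u ++ q) ++ d :: rest).Pairwise (· ≤ ·) := by rw [← hb2]; exact hsb
      have hstepA : pvInnerA x (ans, (u ++ q) ++ d :: rest, tmp) tmp
          = (ans + 1, (u ++ q) ++ rest, (u ++ q).length) := by
        rw [pvInnerA_found x ans ((u ++ q) ++ d :: rest) tmp (u ++ q).length hlenA
              (by rw [hgetA]; exact hxd) tmp (by simp; omega) ?_]
        · rw [remove_sorted ((u ++ q) ++ d :: rest) (u ++ q).length hlenA hsb2]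
          rw [Option.getD_some, eraseIdx_append_cons]
        · intro k hk1 hk2 hk3
          have hk4 : k < (u ++ q).length := hk2
          rw [List.getElem_append_left hk4]
          have hmem := List.getElem_mem hk4
          rcases List.mem_append.mp hmem with h1 | h2
          · exact hux _ h1
          · exact hqle _ h2
      rw [hb2, hstepA, hstepB]
      have hrest : rest = b.drop (j + q.length + 1) := by
        have : b.drop (j + q.length + 1) = (b.drop (j + q.length)).drop 1 := by
          rw [List.drop_drop]
        rw [this, hdropm, List.drop_one, List.tail_cons]
      rw [hrest]
      refine ih b (u ++ q) (u ++ q).length (j + q.length + 1) (ans + 1)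
        (List.pairwise_cons.mp hsa).2 ?_ le_rfl (by omega) ?_
      · rw [← hrest]
        exact hsb2.sublist (List.Sublist.append_left (List.sublist_cons_self d rest) (u ++ q))
      · intro y hy z hz
        rcases List.mem_append.mp hy with h1 | h2
        · exact hu y h1 z (by simp [hz])
        · exact le_trans (hqle _ h2) (hxa z hz)

-- ===== VERDICT (by name: the statement is the Claim_ definition above) =====
theorem solution_spec : Claim_equal_solution := by
  intro A B _
  unfold Spec_solution
  simp only [solution, solution_alt]
  rw [PySem.List.foldl_pyRange_zero_pyGetD' (PySem.List.sorted A (fun x => x) false) 0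
        (fun st v => pvInnerA v st st.2.2) ((0 : Int), PySem.List.sorted B (fun x => x) false, (0 : Nat))]
  have h := loop_eq (PySem.List.sorted A (fun x => x) false) (PySem.List.sorted B (fun x => x) false)
      [] 0 0 0 (by simpa using PySem.List.sorted_pairwise A (fun x => x))
      (by simpa using PySem.List.sorted_pairwise B (fun x => x)) (by simp) (by simp) (by simp)
  simpa using h
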